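-- pv_equiv track=rewrite | github.com/lsn5963/Algorithm | Programmers/푸드 파이트 대회.py | solution
-- ===== SOURCE A (Python) =====
-- def solution(food):
--     first = ""
--     last = ""
--     for i in range(1,len(food)):
--         f = food[i]
--         while f > 1 :
--             first += str(i)
--             last = str(i) + last
--             f -= 2
--     return first + "0" + last
-- ===== SOURCE B (Python) =====
-- def solution(food):
--     def wrap(i):
--         if i >= len(food):
--             return "0"
--         t = str(i) * (food[i] // 2)
--         return t + wrap(i + 1) + t
--     return wrap(1)
-- ===== Notes on version B (the rewrite author's own statement) =====
-- stated objective: alternative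
-- what changed: Replaces A's iterative pair of accumulators (append to 'first', prepend to 'last') by a single recursion that builds the answer outside-in, wrapping the recursive result for the remaining indices between two copies of the current index's block; no second accumulator and no reversal.
import Mathlib
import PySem

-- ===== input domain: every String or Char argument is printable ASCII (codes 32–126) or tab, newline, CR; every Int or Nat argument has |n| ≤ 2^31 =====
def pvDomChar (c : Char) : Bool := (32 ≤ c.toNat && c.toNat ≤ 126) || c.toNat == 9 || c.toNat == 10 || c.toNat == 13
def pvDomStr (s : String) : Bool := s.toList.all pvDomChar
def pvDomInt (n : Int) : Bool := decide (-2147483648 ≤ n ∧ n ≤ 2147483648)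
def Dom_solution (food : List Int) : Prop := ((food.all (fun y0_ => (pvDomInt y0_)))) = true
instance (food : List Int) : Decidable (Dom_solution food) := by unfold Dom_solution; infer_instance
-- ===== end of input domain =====

-- B replaces A's two parallel accumulators (append-built 'first', prepend-built 'last')
-- by one outside-in recursion wrap(i) = t ++ wrap(i+1) ++ t (objective: alternative).
-- Strings are carried as List Char (PySem convention) and packed with String.ofList at return.

-- ===== PORT A =====
-- the inner 'while f > 1: first += str(i); last = str(i) + last; f -= 2'
def pvInnerA (i : Int) (first last : List Char) (f : Int) : List Char × List Char :=
  if 1 < f then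
    pvInnerA i (first ++ PySem.Int.toChars i) (PySem.Int.toChars i ++ last) (f - 2)
  else (first, last)
termination_by f.toNat
decreasing_by omega

def solution (food : List Int) : String :=
  let r := (PySem.List.pyRange 1 food.length 1).foldl
    (fun (acc : List Char × List Char) i =>
      pvInnerA i acc.1 acc.2 (PySem.List.pyGetD food i 0)) ([], [])
  String.ofList (r.1 ++ ['0'] ++ r.2)

-- ===== PORT B =====
-- str(i) * n  (empty for n ≤ 0, as in Python)
def pvRep (cs : List Char) (n : Int) : List Char :=
  if 0 < n then cs ++ pvRep cs (n - 1) else []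
termination_by n.toNat
decreasing_by omega

-- 'def wrap(i): return "0" if i >= len(food) else t + wrap(i+1) + t'
def pvWrap (food : List Int) (i : Int) : List Char :=
  if i < (food.length : Int) then
    pvRep (PySem.Int.toChars i) (PySem.Int.floordiv (PySem.List.pyGetD food i 0) 2)
      ++ pvWrap food (i + 1)
      ++ pvRep (PySem.Int.toChars i) (PySem.Int.floordiv (PySem.List.pyGetD food i 0) 2)
  else ['0']
termination_by ((food.length : Int) - i).toNat
decreasing_by omega

def solution_alt (food : List Int) : String :=
  String.ofList (pvWrap food 1)

-- ===== PRECONDITION & SPEC =====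
def Spec_solution (food : List Int) (out : String) : Prop := out = solution_alt food
instance (food : List Int) (out : String) : Decidable (Spec_solution food out) := by unfold Spec_solution; infer_instance

-- ===== CLAIM (what is proved, stated in full; the proofs are below) =====
def Claim_equal_solution : Prop := ∀ (food : List Int), Dom_solution food → Spec_solution food (solution food)

-- ===== LEMMAS AND PROOFS =====
theorem pvRep_eq_replicate (cs : List Char) (n : Int) :
    pvRep cs n = (List.replicate n.toNat cs).flatten := by
  induction n using pvRep.induct with
  | case1 n h ih =>
      rw [pvRep, if_pos h, ih]
      have hn : n.toNat = (n - 1).toNat + 1 := by omega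
      rw [hn, List.replicate_succ, List.flatten_cons]
  | case2 n h =>
      rw [pvRep, if_neg h]
      have hn : n.toNat = 0 := by omega
      simp [hn]

theorem pvRep_comm (cs : List Char) (n : Int) :
    pvRep cs n ++ cs = cs ++ pvRep cs n := by
  rw [pvRep_eq_replicate]
  induction n.toNat with
  | zero => simp
  | succ m ih => simp only [List.replicate_succ, List.flatten_cons, List.append_assoc, ih]

theorem pvRep_succ (cs : List Char) (n : Int) (hn : 0 ≤ n) :
    pvRep cs (n + 1) = cs ++ pvRep cs n := by
  rw [pvRep, if_pos (by omega)]
  norm_num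

theorem pvInnerA_eq (i : Int) (first last : List Char) (f : Int) :
    pvInnerA i first last f =
      (first ++ pvRep (PySem.Int.toChars i) (PySem.Int.floordiv f 2),
       pvRep (PySem.Int.toChars i) (PySem.Int.floordiv f 2) ++ last) := by
  induction first, last, f using pvInnerA.induct (i := i) with
  | case1 first last f h ih =>
      rw [pvInnerA, if_pos h, ih]
      have hdiv : PySem.Int.floordiv f 2 = PySem.Int.floordiv (f - 2) 2 + 1 := by
        rw [PySem.Int.floordiv_eq_ediv_of_pos (a := f) (b := 2) (by omega),
            PySem.Int.floordiv_eq_ediv_of_pos (a := f - 2) (b := 2) (by omega)]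
        omega
      have hk : 0 ≤ PySem.Int.floordiv (f - 2) 2 := by
        rw [PySem.Int.floordiv_eq_ediv_of_pos (by omega)]; omega
      rw [hdiv, pvRep_succ _ _ hk]
      simp only [Prod.mk.injEq]
      constructor
      · simp [List.append_assoc]
      · simp only [← List.append_assoc, pvRep_comm]
  | case2 first last f h =>
      rw [pvInnerA, if_neg h]
      have hnp : ¬ 0 < PySem.Int.floordiv f 2 := by
        rw [PySem.Int.floordiv_eq_ediv_of_pos (by omega)]; omega
      rw [pvRep, if_neg hnp]
      simp

theorem pvFold_eq (g : Int → Int) (xs : List Int) (first last : List Char) :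
    xs.foldl (fun (acc : List Char × List Char) i =>
        pvInnerA i acc.1 acc.2 (g i)) (first, last) =
      (first ++ (xs.map (fun i => pvRep (PySem.Int.toChars i) (PySem.Int.floordiv (g i) 2))).flatten,
       (xs.map (fun i => pvRep (PySem.Int.toChars i) (PySem.Int.floordiv (g i) 2))).reverse.flatten ++ last) := by
  induction xs generalizing first last with
  | nil => simp
  | cons x xs ih =>
      rw [List.foldl_cons, pvInnerA_eq, ih]
      simp [List.append_assoc]

-- pvWrap computes the forward blocks, then '0', then the blocks in reverse block order
theorem pvWrap_eq (food : List Int) (i : Int) :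
    pvWrap food i =
      ((PySem.List.pyRange i food.length 1).map
          (fun j => pvRep (PySem.Int.toChars j) (PySem.Int.floordiv (PySem.List.pyGetD food j 0) 2))).flatten
        ++ ['0'] ++
      ((PySem.List.pyRange i food.length 1).map
          (fun j => pvRep (PySem.Int.toChars j) (PySem.Int.floordiv (PySem.List.pyGetD food j 0) 2))).reverse.flatten := by
  induction i using pvWrap.induct (food := food) with
  | case1 i h ih =>
      rw [pvWrap, if_pos h, ih, PySem.List.pyRange_one_cons h]
      simp [List.append_assoc]
  | case2 i h =>
      rw [pvWrap, if_neg h]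
      have hr : PySem.List.pyRange i food.length 1 = [] := by
        rw [PySem.List.pyRange_one]
        have h0 : ((food.length : Int) - i).toNat = 0 := by omega
        simp [h0]
      simp [hr]

-- ===== VERDICT (by name: the statement is the Claim_ definition above) =====
theorem solution_spec : Claim_equal_solution := by
  intro food _
  unfold Spec_solution solution solution_alt
  rw [pvFold_eq (fun i => PySem.List.pyGetD food i 0), pvWrap_eq]
  simp
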